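-- pv_equiv track=rewrite | github.com/tteofili/cheapER | cheaper/data/sampling_dataset_pt.py | sampling_table
-- ===== SOURCE A (Python) =====
-- def concatenate_list_data(list):
--     result = ''
--     for element in list:
--         result += ' ' + str(element)
--     return result
--
-- def sampling_table(table_list, indici):
--     result_list1 = []
--     data = []
--     for j in range(len(table_list)):
--         table_el = []
--         for i1 in indici:
--             table_el.append(table_list[j][i1])
--         data.append(table_el)
--         stringa_el = concatenate_list_data(table_el)
--         lista_di_stringhe = stringa_el.split()
--         result_list1.append(lista_di_stringhe)
--     return result_list1, data
-- ===== SOURCE B (Python) =====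
-- def sampling_table(table_list, indici):
--     data = [[row[i] for i in indici] for row in table_list]
--     result_list1 = [[tok for el in drow for tok in str(el).split()] for drow in data]
--     return result_list1, data
-- ===== Notes on version B (the rewrite author's own statement) =====
-- stated objective: simpler
-- what changed: Replaces the interleaved index-loop that builds each row's space-joined string and re-splits it with two plain passes: first select the column matrix, then tokenize each selected cell directly and flatten, eliminating the concatenate_list_data string-building helper.
import Mathlib
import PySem

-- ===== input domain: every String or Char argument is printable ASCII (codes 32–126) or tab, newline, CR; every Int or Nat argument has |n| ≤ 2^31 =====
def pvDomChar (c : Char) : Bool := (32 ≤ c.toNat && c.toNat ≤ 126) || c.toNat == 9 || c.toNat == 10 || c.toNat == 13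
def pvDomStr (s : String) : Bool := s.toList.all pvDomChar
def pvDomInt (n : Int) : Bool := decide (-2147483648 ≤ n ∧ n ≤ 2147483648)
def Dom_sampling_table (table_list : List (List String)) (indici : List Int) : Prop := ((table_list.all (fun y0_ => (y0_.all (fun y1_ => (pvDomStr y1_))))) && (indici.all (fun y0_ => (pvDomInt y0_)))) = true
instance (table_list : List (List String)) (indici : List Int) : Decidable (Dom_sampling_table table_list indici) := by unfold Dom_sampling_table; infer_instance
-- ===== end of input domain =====

-- B replaces the interleaved join-with-spaces-then-split loop with two plain passes
-- (select the column matrix, then tokenize each cell and flatten); objective: simpler.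


-- ===== PORT A =====
def concatenate_list_data (l : List String) : String :=
  l.foldl (fun result element => result ++ " " ++ element) ""

def sampling_table (table_list : List (List String)) (indici : List Int) : List (List String) × List (List String) :=
  (PySem.List.pyRange 0 (PySem.List.len table_list)).foldl
    (fun st j =>
      let table_el := indici.foldl
        (fun acc i1 => acc ++ [PySem.List.pyGetD (PySem.List.pyGetD table_list j []) i1 ""]) []
      let stringa_el := concatenate_list_data table_el
      let lista_di_stringhe := PySem.Str.split₀ stringa_el
      (st.1 ++ [lista_di_stringhe], st.2 ++ [table_el]))
    ([], [])

-- ===== PORT B =====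
def sampling_table_alt (table_list : List (List String)) (indici : List Int) : List (List String) × List (List String) :=
  let data := table_list.map (fun row => indici.map (fun i => PySem.List.pyGetD row i ""))
  (data.map (fun drow => drow.flatMap PySem.Str.split₀), data)

-- ===== PRECONDITION & SPEC =====
-- Pre_ excludes exactly the inputs where A raises IndexError (a selected index out of Python range for some row).
def Pre_sampling_table (table_list : List (List String)) (indici : List Int) : Prop :=
  ∀ row ∈ table_list, ∀ i ∈ indici, -(row.length : Int) ≤ i ∧ i < (row.length : Int)
instance (table_list : List (List String)) (indici : List Int) : Decidable (Pre_sampling_table table_list indici) := by unfold Pre_sampling_table; infer_instance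

def pvWitness_sampling_table : List (List String) × List Int := ([["a b", "c"], ["", "x y"]], [1, -2, 0])

def Spec_sampling_table (table_list : List (List String)) (indici : List Int) (out : List (List String) × List (List String)) : Prop := out = sampling_table_alt table_list indici
instance (table_list : List (List String)) (indici : List Int) (out : List (List String) × List (List String)) : Decidable (Spec_sampling_table table_list indici out) := by unfold Spec_sampling_table; infer_instance

-- ===== CLAIM (what is proved, stated in full; the proofs are below) =====
def Claim_equal_sampling_table : Prop := ∀ (table_list : List (List String)) (indici : List Int), Dom_sampling_table table_list indici → Pre_sampling_table table_list indici → Spec_sampling_table table_list indici (sampling_table table_list indici)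

-- ===== LEMMAS AND PROOFS =====

-- split₀.go: the accumulator is a reversed prefix of the final result
theorem split_go_acc (s cur : List Char) (acc : List (List Char)) :
    PySem.Chars.split₀.go s cur acc = acc.reverse ++ PySem.Chars.split₀.go s cur [] := by
  induction s generalizing cur acc with
  | nil =>
    simp only [PySem.Chars.split₀.go]
    by_cases h : cur.isEmpty <;> simp [h]
  | cons c rest ih =>
    simp only [PySem.Chars.split₀.go]
    by_cases hs : PySem.Chars.isspace c
    · by_cases h : cur.isEmpty
      · simp only [hs, h, if_true]
        exact ih [] acc
      · simp only [hs, h, if_true]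
        rw [ih [] (cur.reverse :: acc), ih [] [cur.reverse]]
        simp
    · simp only [hs]
      exact ih (c :: cur) acc

-- stepping over an explicit space separator
theorem split_go_space (b a cur : List Char) (acc : List (List Char)) :
    PySem.Chars.split₀.go (a ++ ' ' :: b) cur acc
      = PySem.Chars.split₀.go b [] ((PySem.Chars.split₀.go a cur acc).reverse) := by
  induction a generalizing cur acc with
  | nil =>
    simp only [List.nil_append, PySem.Chars.split₀.go]
    by_cases h : cur.isEmpty <;> simp [h, PySem.Chars.isspace]
  | cons c rest ih =>
    simp only [List.cons_append, PySem.Chars.split₀.go]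
    by_cases hs : PySem.Chars.isspace c
    · by_cases h : cur.isEmpty <;> simp [hs, h, ih]
    · simp [hs, ih]

theorem split₀_space_append (a b : List Char) :
    PySem.Chars.split₀ (a ++ ' ' :: b) = PySem.Chars.split₀ a ++ PySem.Chars.split₀ b := by
  simp only [PySem.Chars.split₀]
  rw [split_go_space, split_go_acc, List.reverse_reverse]

-- the Char-level concatenation performed by concatenate_list_data
def clChars (l : List (List Char)) : List Char :=
  l.foldl (fun r e => r ++ ' ' :: e) []

theorem split₀_clChars (l : List (List Char)) :
    PySem.Chars.split₀ (clChars l) = l.flatMap PySem.Chars.split₀ := by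
  induction l using List.reverseRecOn with
  | nil => decide
  | append_singleton l e ih =>
    simp [clChars, List.foldl_append, split₀_space_append, ← ih]

theorem toList_concatenate (l : List String) :
    (concatenate_list_data l).toList = clChars (l.map String.toList) := by
  suffices h : ∀ (init : String),
      (l.foldl (fun r e => r ++ " " ++ e) init).toList
        = (l.map String.toList).foldl (fun r e => r ++ ' ' :: e) init.toList by
    simpa [concatenate_list_data, clChars] using h ""
  induction l with
  | nil => intro init; rfl
  | cons x xs ih =>
    intro init
    simp only [List.foldl_cons, List.map_cons]
    rw [ih (init ++ " " ++ x),
      show (init ++ " " ++ x).toList = init.toList ++ ' ' :: x.toList from by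
        simp [String.toList_append]]

theorem split₀_concatenate (l : List String) :
    PySem.Str.split₀ (concatenate_list_data l) = l.flatMap PySem.Str.split₀ := by
  simp only [PySem.Str.split₀, toList_concatenate, split₀_clChars, List.flatMap_map]
  rw [List.map_flatMap]
  rfl

theorem inner_foldl_eq_map (indici : List Int) (row : List String) :
    indici.foldl (fun acc i1 => acc ++ [PySem.List.pyGetD row i1 ""]) []
      = indici.map (fun i => PySem.List.pyGetD row i "") := by
  have h := PySem.List.foldl_append_eq_flatMap (fun i => [PySem.List.pyGetD row i ""]) indici []
  rw [List.nil_append] at h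
  rw [h]
  clear h
  induction indici with
  | nil => rfl
  | cons x xs ih => simp [List.flatMap_cons, ih]

theorem outer_foldl_eq_map (tl : List (List String)) (F G : List String → List String)
    (r d : List (List String)) :
    tl.foldl (fun (st : List (List String) × List (List String)) row =>
        (st.1 ++ [F row], st.2 ++ [G row])) (r, d)
      = (r ++ tl.map F, d ++ tl.map G) := by
  induction tl generalizing r d with
  | nil => simp
  | cons x xs ih => simp [ih]

-- ===== VERDICT (by name: the statement is the Claim_ definition above) =====
theorem sampling_table_spec : Claim_equal_sampling_table := by
  intro table_list indici _ _
  show sampling_table table_list indici = sampling_table_alt table_list indici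
  have h1 :
      sampling_table table_list indici
        = table_list.foldl (fun (st : List (List String) × List (List String)) row =>
            (st.1 ++ [PySem.Str.split₀ (concatenate_list_data
                (indici.foldl (fun acc i1 => acc ++ [PySem.List.pyGetD row i1 ""]) []))],
             st.2 ++ [indici.foldl (fun acc i1 => acc ++ [PySem.List.pyGetD row i1 ""]) []]))
            ([], []) := by
    have h := PySem.List.foldl_pyRange_pyGetD table_list []
      (fun (st : List (List String) × List (List String)) row =>
        (st.1 ++ [PySem.Str.split₀ (concatenate_list_data
            (indici.foldl (fun acc i1 => acc ++ [PySem.List.pyGetD row i1 ""]) []))],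
         st.2 ++ [indici.foldl (fun acc i1 => acc ++ [PySem.List.pyGetD row i1 ""]) []]))
      ([], []) (a := 0) (by norm_num)
    simpa [sampling_table] using h
  rw [h1, outer_foldl_eq_map]
  simp only [inner_foldl_eq_map, split₀_concatenate, sampling_table_alt, List.nil_append,
    List.map_map]
  rfl
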